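-- pv_equiv track=rewrite | github.com/benrucker/JermaBot | jerma/cogs/utils/search.py | search
-- ===== SOURCE A (Python) =====
-- from typing import Sequence, TypeVar
--
-- def search(query: str, possibilities: Sequence[str]) -> Sequence[str]:
--     direct_matches = {
--         s for s in possibilities if s.startswith(query)
--     }
--
--     close_matches = {
--         s for s in possibilities if letters_appear_in_order(query, s)
--     }.difference(direct_matches)
--
--     matches = list(sorted(direct_matches)) + list(sorted(close_matches))
--
--     return matches
--
-- def letters_appear_in_order(part: str, full: str):
--     part: list = list(part)
--     while full and part:
--         index = full.find(part.pop(0))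
--         if index == -1:
--             return False
--         full = full[index + 1:]
--     return not part
-- ===== SOURCE B (Python) =====
-- def search(query, possibilities):
--     uniq = sorted(set(possibilities))
--     direct = [s for s in uniq if s.startswith(query)]
--     close = [s for s in uniq
--              if not s.startswith(query) and _is_subsequence(query, s)]
--     return direct + close
--
-- def _is_subsequence(part, full):
--     it = iter(full)
--     return all(c in it for c in part)
-- ===== Notes on version B (the rewrite author's own statement) =====
-- stated objective: faster
-- what changed: B sorts the deduplicated input once and splits the single sorted list with two filters (prefix matches first, then non-prefix subsequence matches tested with the iterator idiom it=iter(full); all(c in it for c in query)), instead of A's two set comprehensions, a set difference and two separate sorts with a find-and-reslice subsequence loop.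
import Mathlib
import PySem

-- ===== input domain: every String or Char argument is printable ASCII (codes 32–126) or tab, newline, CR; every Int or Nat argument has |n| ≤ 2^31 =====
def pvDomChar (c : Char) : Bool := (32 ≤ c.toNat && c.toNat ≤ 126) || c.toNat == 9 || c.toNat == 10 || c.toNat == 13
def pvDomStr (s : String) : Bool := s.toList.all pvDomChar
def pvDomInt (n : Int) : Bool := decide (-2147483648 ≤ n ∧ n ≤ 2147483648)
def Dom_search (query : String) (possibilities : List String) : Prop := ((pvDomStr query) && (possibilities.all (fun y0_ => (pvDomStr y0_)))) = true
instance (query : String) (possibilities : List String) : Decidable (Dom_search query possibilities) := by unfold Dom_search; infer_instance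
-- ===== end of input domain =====

-- B sorts the deduplicated input once and partitions the sorted list with two filters
-- (iterator-style subsequence helper), instead of A's two sets, set difference and two sorts
-- (objective: simpler; same return value).

-- ===== PORT A =====
-- letters_appear_in_order: while-loop over (part, full); part loses its head each iteration
def laio : List Char → List Char → Bool
  | p :: part, full@(_ :: _) =>
      let index := PySem.Chars.find full [p]
      if index = -1 then false
      else laio part (PySem.List.slice full (some (index + 1)) none)
  | part, _ => part.isEmpty

def search (query : String) (possibilities : List String) : List String :=
  let direct := PySem.Set.ofList (possibilities.filter (fun s => PySem.Str.startswith s query))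
  let close := PySem.Set.diff
    (PySem.Set.ofList (possibilities.filter (fun s => laio query.toList s.toList))) direct
  PySem.List.sorted direct (fun x => x) false ++ PySem.List.sorted close (fun x => x) false

-- ===== PORT B =====
-- 'c in it' on an iterator: consume full up to and past the first c, or exhaust it
def skipTo (c : Char) : List Char → Option (List Char)
  | [] => none
  | x :: xs => if x = c then some xs else skipTo c xs

def isSubsequence : List Char → List Char → Bool
  | [], _ => true
  | c :: part, full =>
      match skipTo c full with
      | none => false
      | some rest => isSubsequence part rest

def search_alt (query : String) (possibilities : List String) : List String :=
  let uniq := PySem.List.sorted (PySem.Set.ofList possibilities) (fun x => x) false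
  let direct := uniq.filter (fun s => PySem.Str.startswith s query)
  let close := uniq.filter
    (fun s => !PySem.Str.startswith s query && isSubsequence query.toList s.toList)
  direct ++ close

-- ===== PRECONDITION & SPEC =====
def Spec_search (query : String) (possibilities : List String) (out : List String) : Prop := out = search_alt query possibilities
instance (query : String) (possibilities : List String) (out : List String) : Decidable (Spec_search query possibilities out) := by unfold Spec_search; infer_instance

-- ===== CLAIM (what is proved, stated in full; the proofs are below) =====
def Claim_equal_search : Prop := ∀ (query : String) (possibilities : List String), Dom_search query possibilities → Spec_search query possibilities (search query possibilities)

-- ===== LEMMAS AND PROOFS =====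

-- find.go on a one-char needle agrees with skipTo (accumulator-generalised)
lemma go_skipTo (p : Char) (full : List Char) (k : Nat) :
    (PySem.Chars.find.go [p] full k = -1 ∧ skipTo p full = none) ∨
    (∃ n : Nat, PySem.Chars.find.go [p] full k = ((k + n : Nat) : Int) ∧
      skipTo p full = some (full.drop (n + 1))) := by
  induction full generalizing k with
  | nil => left; constructor <;> simp [PySem.Chars.find.go, skipTo]
  | cons x xs ih =>
    by_cases hx : x = p
    · right
      refine ⟨0, ?_, ?_⟩ <;> simp [PySem.Chars.find.go, skipTo, hx, List.isPrefixOf]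
    · have hpx : ¬ p = x := fun h => hx h.symm
      rcases ih (k + 1) with ⟨h1, h2⟩ | ⟨n, h1, h2⟩
      · left
        constructor <;> simp [PySem.Chars.find.go, skipTo, hx, hpx, List.isPrefixOf, h1, h2]
      · right
        refine ⟨n + 1, ?_, ?_⟩ <;>
          simp [PySem.Chars.find.go, skipTo, hx, hpx, List.isPrefixOf, h1, h2] <;> omega

lemma laio_eq_isSubsequence (part full : List Char) :
    laio part full = isSubsequence part full := by
  induction part generalizing full with
  | nil => cases full <;> simp [laio, isSubsequence]
  | cons p ps ih =>
    cases full with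
    | nil => simp [laio, isSubsequence, skipTo]
    | cons x xs =>
      rcases go_skipTo p (x :: xs) 0 with ⟨h1, h2⟩ | ⟨n, h1, h2⟩
      · simp [laio, isSubsequence, PySem.Chars.find, h1, h2]
      · have hcast : ((0 + n : Nat) : Int) + 1 = (((n + 1 : Nat)) : Int) := by push_cast; ring
        simp only [laio, isSubsequence, PySem.Chars.find, h1, h2, hcast]
        rw [PySem.List.slice_from_natCast]
        simp only [ih]
        simp

-- membership in A's sets, as plain propositions
lemma mem_A_direct (query : String) (xs : List String) (s : String) :
    s ∈ PySem.Set.ofList (xs.filter (fun t => PySem.Str.startswith t query)) ↔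
      s ∈ xs ∧ PySem.Str.startswith s query = true := by
  simp [PySem.Set.mem_ofList, List.mem_filter]

-- the filters of B's single sorted list coincide with A's two sorted sets
lemma sorted_filter_eq (xs : List String) (p : String → Bool) (S : List String)
    (hS : S.Nodup) (hmem : ∀ s, s ∈ S ↔ s ∈ xs ∧ p s = true) :
    PySem.List.sorted S (fun x => x) false =
      (PySem.List.sorted (PySem.Set.ofList xs) (fun x => x) false).filter p := by
  apply PySem.List.sorted_eq_of_perm_of_pairwise_lt
  · rw [List.perm_ext_iff_of_nodup]
    · intro a
      simp only [List.mem_filter, hmem]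
      have := PySem.List.sorted_perm (PySem.Set.ofList xs) (fun x : String => x) false
      rw [this.mem_iff, PySem.Set.mem_ofList]
    · exact List.Nodup.filter _
        ((PySem.List.sorted_perm (PySem.Set.ofList xs) (fun x : String => x) false).nodup_iff.mpr
          (PySem.Set.nodup_ofList xs))
    · exact hS
  · exact (PySem.List.sorted_ofList_pairwise_lt xs).sublist List.filter_sublist

-- ===== VERDICT (by name: the statement is the Claim_ definition above) =====
theorem search_spec : Claim_equal_search := by
  intro query possibilities _
  unfold Spec_search search search_alt
  simp only []
  congr 1
  · exact sorted_filter_eq possibilities _ _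
      (PySem.Set.nodup_ofList _)
      (fun s => by rw [mem_A_direct query possibilities s])
  · apply sorted_filter_eq possibilities _ _
    · exact PySem.Set.nodup_diff _ _ (PySem.Set.nodup_ofList _)
    · intro s
      rw [PySem.Set.mem_diff]
      simp only [PySem.Set.mem_ofList, List.mem_filter, laio_eq_isSubsequence,
        PySem.Str.startswith_eq, Bool.and_eq_true, Bool.not_eq_true']
      constructor
      · rintro ⟨⟨hmem, hsub⟩, hnd⟩
        refine ⟨hmem, ?_, hsub⟩
        by_contra h
        exact hnd ⟨hmem, by simpa using h⟩
      · rintro ⟨hmem, hnsw, hsub⟩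
        exact ⟨⟨hmem, hsub⟩, fun h => by simp [hnsw] at h⟩
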